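-- pv_equiv track=rewrite | github.com/Sarita-021/Striver-A2Z-DSA-Sheet | Arrays/Difficult/validSudoku.py | valid_Row_Col
-- ===== SOURCE A (Python) =====
-- from collections import defaultdict
--
-- def valid_Row_Col(r):
--     digits_cnt = defaultdict(int)
--     for i in range(len(r)):
--         if r[i] == '.':
--             continue
--         digits_cnt[r[i]] += 1
--
--     for cnt in digits_cnt.values():
--         if cnt > 1 :
--             return False
--     return True
-- ===== SOURCE B (Python) =====
-- def valid_Row_Col(r):
--     kept = sorted(c for c in r if c != '.')
--     return all(a != b for a, b in zip(kept, kept[1:]))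
-- ===== Notes on version B (the rewrite author's own statement) =====
-- stated objective: alternative
-- what changed: Replaces the per-digit count dictionary and the second scan over counts with sort-then-adjacent-scan: sort the non-dot entries and check that no two neighbouring elements are equal (duplicates are adjacent after sorting).
import Mathlib
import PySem

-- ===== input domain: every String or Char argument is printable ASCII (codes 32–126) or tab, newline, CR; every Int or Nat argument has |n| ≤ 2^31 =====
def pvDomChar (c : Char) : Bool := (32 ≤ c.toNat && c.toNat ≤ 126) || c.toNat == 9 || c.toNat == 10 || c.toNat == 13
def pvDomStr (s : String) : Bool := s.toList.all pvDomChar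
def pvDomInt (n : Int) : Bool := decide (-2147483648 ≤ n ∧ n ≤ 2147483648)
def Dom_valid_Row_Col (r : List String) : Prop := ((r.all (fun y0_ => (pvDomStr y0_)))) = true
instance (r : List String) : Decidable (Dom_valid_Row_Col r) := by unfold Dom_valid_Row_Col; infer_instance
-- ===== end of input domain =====

-- B replaces A's count-dictionary plus second scan over counts by sort-then-adjacent-scan:
-- sort the non-dot entries and check no two neighbours are equal; objective: alternative.

-- ===== PORT A =====
def valid_Row_Col (r : List String) : Bool :=
  let digits_cnt : PySem.Dict String Int :=
    (PySem.List.pyRange 0 (PySem.List.len r)).foldl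
      (fun d i =>
        if PySem.List.pyGetD r i "" == "." then d
        else d.modify (PySem.List.pyGetD r i "") 0 (· + 1))
      PySem.Dict.empty
  digits_cnt.values.all (fun cnt => !decide (cnt > 1))

-- ===== PORT B =====
-- kept[1:] on a list is drop 1 (nonnegative slice start)
def valid_Row_Col_alt (r : List String) : Bool :=
  let kept := PySem.List.sorted (r.filter (fun c => c != ".")) (fun x => x) false
  (kept.zip (kept.drop 1)).all (fun p => p.1 != p.2)

-- ===== PRECONDITION & SPEC =====
def Spec_valid_Row_Col (r : List String) (out : Bool) : Prop := out = valid_Row_Col_alt r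
instance (r : List String) (out : Bool) : Decidable (Spec_valid_Row_Col r out) := by unfold Spec_valid_Row_Col; infer_instance

-- ===== CLAIM =====
def Claim_equal_valid_Row_Col : Prop := ∀ (r : List String), Dom_valid_Row_Col r → Spec_valid_Row_Col r (valid_Row_Col r)

-- ===== LEMMAS AND PROOFS =====

-- In a ≤-sorted list, "no two adjacent elements are equal" is exactly Nodup.
theorem pv_adj_all_iff_nodup (ys : List String) (h : ys.Pairwise (· ≤ ·)) :
    ((ys.zip (ys.drop 1)).all (fun p => p.1 != p.2) = true) ↔ ys.Nodup := by
  induction ys with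
  | nil => simp
  | cons a t ih =>
    cases t with
    | nil => simp
    | cons b t' =>
      have hle : a ≤ b := (List.pairwise_cons.mp h).1 b (by simp)
      have hbt : ∀ x ∈ t', b ≤ x :=
        fun x hx => (List.pairwise_cons.mp (List.pairwise_cons.mp h).2).1 x hx
      have ht : (b :: t').Pairwise (· ≤ ·) := (List.pairwise_cons.mp h).2
      have ihh := ih ht
      simp only [List.drop_one, List.tail_cons, List.zip_cons_cons, List.all_cons,
        Bool.and_eq_true, bne_iff_ne, ne_eq, List.nodup_cons] at *
      constructor
      · rintro ⟨hab, hrest⟩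
        have hnt := ihh.mp hrest
        refine ⟨?_, hnt⟩
        intro hmem
        rcases List.mem_cons.mp hmem with rfl | hmem'
        · exact hab rfl
        · exact hab (le_antisymm hle (hbt a hmem'))
      · rintro ⟨hnotmem, hnt⟩
        exact ⟨fun hab => hnotmem (hab ▸ List.mem_cons_self), ihh.mpr hnt⟩

-- set(xs)-style lemmas used for the A side: counter values are counts over first occurrences.
theorem pv_count_le_one_of_nodup (xs : List String) (h : xs.Nodup) (k : String) :
    List.count k xs ≤ 1 := List.nodup_iff_count_le_one.mp h k

-- ===== VERDICT =====
theorem valid_Row_Col_spec : Claim_equal_valid_Row_Col := by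
  intro r _
  show valid_Row_Col r = valid_Row_Col_alt r
  unfold valid_Row_Col valid_Row_Col_alt
  have hloop :
      (PySem.List.pyRange 0 (PySem.List.len r)).foldl
        (fun d i =>
          if PySem.List.pyGetD r i "" == "." then d
          else (PySem.Dict.modify d (PySem.List.pyGetD r i "") 0 (· + 1)))
        PySem.Dict.empty
      = PySem.Dict.counter (r.filter (fun c => c != ".")) := by
    rw [PySem.List.foldl_pyRange_pyGetD r "" (fun d c =>
          if c == "." then d else PySem.Dict.modify d c 0 (· + 1))
        PySem.Dict.empty (le_refl (0 : Int))]
    have hbody : (fun (d : PySem.Dict String Int) c =>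
          if c == "." then d else PySem.Dict.modify d c 0 (· + 1))
        = (fun d c => if (c != ".") = true then PySem.Dict.modify d c 0 (· + 1) else d) := by
      funext d c
      cases hc : (c == ".") <;> simp [hc, bne]
    rw [show (0 : Int).toNat = 0 from rfl, List.drop_zero, hbody,
        PySem.List.foldl_if_eq_foldl_filter, PySem.Dict.counter_eq_foldl]
  rw [hloop]
  set kept := r.filter (fun c => c != ".") with hk
  set s := PySem.List.sorted kept (fun x => x) false with hs
  have hperm : s.Perm kept := PySem.List.sorted_perm kept (fun x => x) false
  have hpw : s.Pairwise (· ≤ ·) := PySem.List.sorted_pairwise kept (fun x => x)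
  have hvals : (PySem.Dict.counter kept).values
      = (PySem.Set.ofList kept).map (fun k => ((List.count k kept : Int))) := by
    simp [PySem.Dict.values, PySem.Dict.items_counter, Function.comp]
  show ((PySem.Dict.counter kept).values.all (fun cnt => !decide (cnt > 1)))
      = (s.zip (s.drop 1)).all (fun p => p.1 != p.2)
  rw [hvals, List.all_map]
  simp only [Function.comp_def]
  by_cases hnd : kept.Nodup
  · have h1 : (PySem.Set.ofList kept).all
        (fun k => !decide ((List.count k kept : Int) > 1)) = true := by
      rw [List.all_eq_true]
      intro k _
      have := pv_count_le_one_of_nodup kept hnd k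
      simp only [gt_iff_lt, Bool.not_eq_eq_eq_not, Bool.not_true, decide_eq_false_iff_not, not_lt]
      exact_mod_cast this
    have h2 : (s.zip (s.drop 1)).all (fun p => p.1 != p.2) = true :=
      (pv_adj_all_iff_nodup s hpw).mpr (hperm.nodup_iff.mpr hnd)
    rw [h1, h2]
  · obtain ⟨a, ha⟩ := not_forall.mp (fun h => hnd (List.nodup_iff_count_le_one.mpr h))
    have ha2 : 2 ≤ List.count a kept := by omega
    have hmem : a ∈ kept := List.count_pos_iff.mp (by omega)
    have h1 : (PySem.Set.ofList kept).all
        (fun k => !decide ((List.count k kept : Int) > 1)) = false := by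
      rw [List.all_eq_false]
      refine ⟨a, (PySem.Set.mem_ofList kept a).mpr hmem, ?_⟩
      simp only [gt_iff_lt, Bool.not_eq_eq_eq_not, Bool.not_true, decide_eq_false_iff_not,
        not_lt, not_le]
      exact_mod_cast ha2
    have h2 : (s.zip (s.drop 1)).all (fun p => p.1 != p.2) = false := by
      have : ¬ ((s.zip (s.drop 1)).all (fun p => p.1 != p.2) = true) :=
        fun h => hnd (hperm.nodup_iff.mp ((pv_adj_all_iff_nodup s hpw).mp h))
      exact Bool.not_eq_true _ ▸ (Bool.eq_false_iff.mpr (fun hh => this hh))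
    rw [h1, h2]
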